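-- pv_equiv track=rewrite | github.com/davidaturner/Scholarship | freecodecamp/csv/coreyschafer/1.3/associate.py | associate_records
-- ===== SOURCE A (Python) =====
-- def associate_records(priv_records, data_records):
--     result = []
--
--     # Implement associating filenames to phone numbers
--     for p in priv_records:
--         psubject_id = p[0]
--         for d in data_records:
--             dsubject_id = d[0]
--             if (psubject_id == dsubject_id):
--                 filename = d[1]
--                 phone_number = p[1]
--                 result.append([filename, phone_number])
--     return result
-- ===== SOURCE B (Python) =====
-- def associate_records(priv_records, data_records):
--     # Hash join: index data records by subject_id once, then one pass over priv_records.
--     if not priv_records: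
--         return []  # nothing to join; skip building the index
--     index = {}
--     for d in data_records:
--         index.setdefault(d[0], []).append(d)
--     return [[d[1], p[1]] for p in priv_records for d in index.get(p[0], [])]
-- ===== Notes on version B (the rewrite author's own statement) =====
-- stated objective: alternative
-- what changed: Replaces the nested-loop join (scanning all data_records for every priv record) by a hash join that indexes data_records by subject_id once and does one dict lookup per priv record.
import Mathlib
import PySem

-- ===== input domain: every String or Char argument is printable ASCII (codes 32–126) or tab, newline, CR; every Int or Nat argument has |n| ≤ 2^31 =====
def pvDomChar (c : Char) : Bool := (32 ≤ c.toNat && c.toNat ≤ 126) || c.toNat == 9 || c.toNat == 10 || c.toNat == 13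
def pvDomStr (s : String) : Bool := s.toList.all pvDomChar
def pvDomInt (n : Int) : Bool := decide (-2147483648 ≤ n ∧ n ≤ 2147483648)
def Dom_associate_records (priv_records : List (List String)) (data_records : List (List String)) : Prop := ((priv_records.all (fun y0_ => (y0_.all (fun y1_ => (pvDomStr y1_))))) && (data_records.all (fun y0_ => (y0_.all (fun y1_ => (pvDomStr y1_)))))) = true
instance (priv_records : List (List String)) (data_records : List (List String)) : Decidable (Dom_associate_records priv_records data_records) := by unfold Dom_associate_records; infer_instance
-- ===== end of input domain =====

-- B is a hash join (index data_records by subject_id once, skipped when there is nothing to join)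
-- instead of A's nested-loop join.

-- ===== PORT A =====
-- Nested loops; p[0]/d[0]/d[1]/p[1] are read with getD, exact under Pre_ (indices in range there).
def associate_records (priv_records : List (List String)) (data_records : List (List String)) : List (List String) :=
  priv_records.foldl (fun result p =>
    data_records.foldl (fun result d =>
      if p.getD 0 "" == d.getD 0 "" then result ++ [[d.getD 1 "", p.getD 1 ""]] else result)
      result) []

-- ===== PORT B =====
-- index.setdefault(d[0], []).append(d) is ported as Dict.modify (d[k] = d.get(k, []) + [v]), the same dict value.
def associate_records_alt (priv_records : List (List String)) (data_records : List (List String)) : List (List String) :=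
  if priv_records = [] then []
  else
    let index : PySem.Dict String (List (List String)) :=
      data_records.foldl (fun idx d => idx.modify (d.getD 0 "") [] (· ++ [d])) PySem.Dict.empty
    priv_records.flatMap (fun p => (index.getD (p.getD 0 "") []).map (fun d => [d.getD 1 "", p.getD 1 ""]))

-- ===== PRECONDITION & SPEC =====
-- Pre_ excludes exactly the inputs on which A raises IndexError: when priv_records is nonempty A reads
-- p[0] for every priv record and d[0] for every data record (so an empty record raises), and on a
-- matching pair it reads d[1] and p[1] (so a matching record of length 1 raises). With priv_records = []
-- A returns [] regardless of data_records, and that case is inside Pre_.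
def Pre_associate_records (priv_records : List (List String)) (data_records : List (List String)) : Prop :=
  priv_records = [] ∨
  ((∀ p ∈ priv_records, p ≠ []) ∧ (∀ d ∈ data_records, d ≠ []) ∧
   (∀ p ∈ priv_records, ∀ d ∈ data_records, p.getD 0 "" = d.getD 0 "" → 2 ≤ p.length ∧ 2 ≤ d.length))
instance (priv_records : List (List String)) (data_records : List (List String)) : Decidable (Pre_associate_records priv_records data_records) := by unfold Pre_associate_records; infer_instance

def pvWitness_associate_records : List (List String) × List (List String) :=
  ([["1", "555-1234"], ["2", "555-9999"]], [["1", "a.txt"], ["3", "b.txt"], ["1", "c.txt"]])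

def Spec_associate_records (priv_records : List (List String)) (data_records : List (List String)) (out : List (List String)) : Prop := out = associate_records_alt priv_records data_records
instance (priv_records : List (List String)) (data_records : List (List String)) (out : List (List String)) : Decidable (Spec_associate_records priv_records data_records out) := by unfold Spec_associate_records; infer_instance

-- ===== CLAIM (what is proved, stated in full; the proofs are below) =====
def Claim_equal_associate_records : Prop := ∀ (priv_records : List (List String)) (data_records : List (List String)), Dom_associate_records priv_records data_records → Pre_associate_records priv_records data_records → Spec_associate_records priv_records data_records (associate_records priv_records data_records)

-- ===== LEMMAS AND PROOFS =====

-- B's index groups data_records: looking up k returns exactly the data records whose field 0 is k, in order.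
lemma index_getD (data_records : List (List String)) (k : String) :
    (data_records.foldl (fun idx d => idx.modify (d.getD 0 "") [] (· ++ [d]))
        (PySem.Dict.empty : PySem.Dict String (List (List String)))).getD k []
      = data_records.filter (fun d => d.getD 0 "" == k) := by
  have h := PySem.Dict.getD_foldl_modify_append
      (l := data_records.map (fun d => (d.getD 0 "", d)))
      (d := (PySem.Dict.empty : PySem.Dict String (List (List String)))) (c := k)
  simpa [List.foldl_map, List.filter_map, List.map_map, Function.comp_def] using h

theorem associate_records_spec : Claim_equal_associate_records := by
  intro priv_records data_records _ _
  unfold Spec_associate_records associate_records associate_records_alt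
  rcases priv_records with _ | ⟨p0, ps⟩
  · simp
  · rw [if_neg (by simp)]
    have hinner : (fun (result : List (List String)) (p : List String) =>
        data_records.foldl (fun result d =>
          if p.getD 0 "" == d.getD 0 "" then result ++ [[d.getD 1 "", p.getD 1 ""]] else result) result)
      = (fun result p =>
        result ++ (data_records.filter (fun d => p.getD 0 "" == d.getD 0 "")).map
          (fun d => [d.getD 1 "", p.getD 1 ""])) := by
      funext result p
      exact PySem.List.foldl_append_if _ _ _ _
    rw [hinner, PySem.List.foldl_append_eq_flatMap]
    simp only [index_getD, List.nil_append]
    refine List.flatMap_congr ?_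
    intro p _
    congr 1
    exact List.filter_congr (fun d _ => by simp [eq_comm])
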